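-- pv_equiv track=rewrite | github.com/raksok/resemantica | src/resemantica/tui/screens/dashboard.py | _build_phase_progress_static
-- ===== SOURCE A (Python) =====
-- def _build_phase_progress_static(state: dict | None) -> str:
--     lines = ["[bold]Phase Progress[/bold]"]
--     stages = [
--         "preprocess-glossary",
--         "preprocess-summaries",
--         "preprocess-idioms",
--         "preprocess-graph",
--         "packets-build",
--         "translate-chapter",
--         "translate-pass3",
--         "epub-rebuild",
--     ]
--     current_stage = state["stage_name"] if state else None
--     for s in stages:
--         done = False
--         if current_stage:
--             idx_now = stages.index(current_stage) if current_stage in stages else -1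
--             idx_s = stages.index(s)
--             if idx_s < idx_now:
--                 done = True
--         marker = "\u25a0" if done else "\u25b8" if s == current_stage else "\u25a1"
--         color = "green" if done else "cyan" if s == current_stage else "comment"
--         lines.append(f"  [{color}]{marker}[/] {s}")
--     return "\n".join(lines)
-- ===== SOURCE B (Python) =====
-- def _build_phase_progress_static(state: dict | None) -> str:
--     stages = [
--         "preprocess-glossary",
--         "preprocess-summaries",
--         "preprocess-idioms",
--         "preprocess-graph",
--         "packets-build",
--         "translate-chapter",
--         "translate-pass3",
--         "epub-rebuild",
--     ]
--     current_stage = state["stage_name"] if state else None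
--     line = "  [{}]{}[/] {}".format
--     if current_stage in stages:
--         i = stages.index(current_stage)
--         body = [line("green", "\u25a0", s) for s in stages[:i]]
--         body.append(line("cyan", "\u25b8", current_stage))
--         body.extend(line("comment", "\u25a1", s) for s in stages[i + 1:])
--     else:
--         body = [line("comment", "\u25a1", s) for s in stages]
--     return "\n".join(["[bold]Phase Progress[/bold]"] + body)
-- ===== Notes on version B (the rewrite author's own statement) =====
-- stated objective: simpler
-- what changed: B locates the current stage once and renders the list as three mapped segments (done prefix, current element, todo suffix) instead of recomputing stages.index and membership inside the per-stage loop.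
import Mathlib
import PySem

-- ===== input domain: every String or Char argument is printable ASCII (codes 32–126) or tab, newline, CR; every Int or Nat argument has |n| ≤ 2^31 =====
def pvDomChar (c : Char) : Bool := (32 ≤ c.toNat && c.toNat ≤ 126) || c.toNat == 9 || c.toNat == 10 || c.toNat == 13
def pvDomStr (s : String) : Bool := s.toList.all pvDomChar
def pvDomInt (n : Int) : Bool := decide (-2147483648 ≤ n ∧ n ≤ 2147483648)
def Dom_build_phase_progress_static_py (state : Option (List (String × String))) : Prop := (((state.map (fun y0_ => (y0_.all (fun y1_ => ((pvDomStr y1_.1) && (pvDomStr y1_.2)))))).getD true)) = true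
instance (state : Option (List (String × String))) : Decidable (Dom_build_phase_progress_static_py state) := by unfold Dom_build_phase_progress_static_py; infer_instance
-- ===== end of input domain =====

set_option maxRecDepth 8000
set_option maxHeartbeats 1000000


-- B renders the same phase-progress text by locating the current stage once and mapping the three
-- segments (done / current / todo) instead of recomputing stages.index inside the per-stage loop;
-- objective: simpler (return value only; neither version mutates its argument).

-- ===== PORT A =====
def pvStagesA : List String :=
  ["preprocess-glossary", "preprocess-summaries", "preprocess-idioms", "preprocess-graph",
   "packets-build", "translate-chapter", "translate-pass3", "epub-rebuild"]

-- current_stage = state["stage_name"] if state else None  (dict lookup = first match in the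
-- association list; `none` where Python raises KeyError — excluded by Pre_ below)
def pvCurA (state : Option (List (String × String))) : Option String :=
  match state with
  | none => none
  | some d => if d.isEmpty then none
              else (d.find? (fun p => p.1 == "stage_name")).map Prod.snd

-- the loop body of A: per stage s, recompute both indices and compare
-- (the f-string is ported as PySem.Str.join "" of its pieces — exact for string concatenation)
def pvFmtA (stages : List String) (current_stage : Option String) (s : String) : String :=
  let done : Bool :=
    match current_stage with
    | none => false
    | some c =>
      if c ≠ "" then
        let idx_now : Int := if c ∈ stages then ((PySem.List.index? stages c).getD 0 : Int) else -1
        let idx_s : Int := ((PySem.List.index? stages s).getD 0 : Int)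
        decide (idx_s < idx_now)
      else false
  let marker : String := if done then "■" else if some s = current_stage then "▸" else "□"
  let color : String := if done then "green" else if some s = current_stage then "cyan" else "comment"
  PySem.Str.join "" ["  [", color, "]", marker, "[/] ", s]

-- the for-loop of A: append one formatted line per stage, then "\n".join
def pvLoopA (stages : List String) (current_stage : Option String) : String :=
  PySem.Str.join "\n"
    (stages.foldl (fun acc s => acc ++ [pvFmtA stages current_stage s])
      ["[bold]Phase Progress[/bold]"])

def build_phase_progress_static_py (state : Option (List (String × String))) : String :=
  pvLoopA pvStagesA (pvCurA state)

-- ===== PORT B =====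
def pvStagesB : List String :=
  ["preprocess-glossary", "preprocess-summaries", "preprocess-idioms", "preprocess-graph",
   "packets-build", "translate-chapter", "translate-pass3", "epub-rebuild"]

-- Source B's `line = "  [{}]{}[/] {}".format` (ported as PySem.Str.join "" of the pieces)
def pvLineB (color marker s : String) : String :=
  PySem.Str.join "" ["  [", color, "]", marker, "[/] ", s]

-- B: locate the current stage once ('current_stage in stages' + 'stages.index' = index?, none
-- when absent or current_stage is None); render prefix as done, the element itself, suffix as
-- todo (stages[:i] = take i, stages[i+1:] = drop (i+1): slices with in-range nonneg bounds).
def pvRenderB (stages : List String) (current_stage : Option String) : String :=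
  let body : List String :=
    match current_stage.bind (PySem.List.index? stages) with
    | some i =>
      (stages.take i).map (pvLineB "green" "■")
        ++ pvLineB "cyan" "▸" (current_stage.getD "")
          :: (stages.drop (i + 1)).map (pvLineB "comment" "□")
    | none => stages.map (pvLineB "comment" "□")
  PySem.Str.join "\n" ("[bold]Phase Progress[/bold]" :: body)

def pvCurB (state : Option (List (String × String))) : Option String :=
  state.bind (fun d =>
    if d.isEmpty then none
    else (d.find? (fun p => p.1 == "stage_name")).map Prod.snd)

def build_phase_progress_static_py_alt (state : Option (List (String × String))) : String :=
  pvRenderB pvStagesB (pvCurB state)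

-- ===== PRECONDITION & SPEC =====
-- Pre_ excludes only the inputs where Python A raises KeyError: a non-empty dict without a
-- "stage_name" key (B raises there too).
def Pre_build_phase_progress_static_py (state : Option (List (String × String))) : Prop :=
  (state.getD []).isEmpty = true ∨ "stage_name" ∈ (state.getD []).map Prod.fst
instance (state : Option (List (String × String))) : Decidable (Pre_build_phase_progress_static_py state) := by unfold Pre_build_phase_progress_static_py; infer_instance

def pvWitness_build_phase_progress_static_py : (Option (List (String × String))) :=
  some [("stage_name", "packets-build")]

def Spec_build_phase_progress_static_py (state : Option (List (String × String))) (out : String) : Prop := out = build_phase_progress_static_py_alt state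
instance (state : Option (List (String × String))) (out : String) : Decidable (Spec_build_phase_progress_static_py state out) := by unfold Spec_build_phase_progress_static_py; infer_instance

-- ===== CLAIM (what is proved, stated in full; the proofs are below) =====
def Claim_equal_build_phase_progress_static_py : Prop := ∀ (state : Option (List (String × String))), Dom_build_phase_progress_static_py state → Pre_build_phase_progress_static_py state → Spec_build_phase_progress_static_py state (build_phase_progress_static_py state)

-- ===== LEMMAS AND PROOFS =====

-- the two extractions of current_stage agree
lemma pvCur_eq (state : Option (List (String × String))) : pvCurA state = pvCurB state := by
  cases state <;> rfl

-- a Nat cast is never < -1 (A's idx_s < idx_now test when current_stage is not a stage)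
lemma pv_decide_lt_neg_one (o : Option Nat) :
    decide (((o.getD 0 : Nat) : Int) < -1) = false := by
  exact decide_eq_false (by omega)

-- in a nodup list, the index of the j-th element is j
lemma pv_index?_getElem (L : List String) (hnd : L.Nodup) (j : Nat) (hj : j < L.length) :
    PySem.List.index? L L[j] = some j := by
  apply (PySem.List.index?_eq_some_iff _ _ _).mpr
  refine ⟨L.take j, L.drop (j + 1), ?_, by simp [hj.le], ?_⟩
  · rw [← List.drop_eq_getElem_cons hj, List.take_append_drop]
  · intro hmem
    rw [List.mem_take_iff_getElem] at hmem
    obtain ⟨k, hk, hkj⟩ := hmem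
    have : k = j := (hnd.getElem_inj_iff).mp hkj
    omega

-- A's loop body when current_stage is None: a todo line
lemma pvFmtA_none (L : List String) (s : String) :
    pvFmtA L none s = pvLineB "comment" "□" s := by
  simp [pvFmtA, pvLineB]

-- A's loop body when current_stage is a string that is not a stage: a todo line
lemma pvFmtA_notmem (L : List String) (cs s : String) (hmem : cs ∉ L) (hs : s ≠ cs) :
    pvFmtA L (some cs) s = pvLineB "comment" "□" s := by
  simp only [pvFmtA, pvLineB, if_neg hmem, pv_decide_lt_neg_one, ite_self,
             Option.some.injEq, hs, if_false]
  rfl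

-- A's loop body on a stage strictly before the current one: a done line
lemma pvFmtA_done (L : List String) (cs : String) (i : Nat)
    (hcs : cs ≠ "") (hmem : cs ∈ L) (hidx : PySem.List.index? L cs = some i)
    (s : String) (j : Nat) (hjs : PySem.List.index? L s = some j) (hlt : j < i) :
    pvFmtA L (some cs) s = pvLineB "green" "■" s := by
  simp only [pvFmtA, pvLineB, if_pos hmem, hidx, hjs, Option.getD_some]
  rw [if_pos hcs]
  simp [hlt]

-- A's loop body on the current stage itself: the cyan marker
lemma pvFmtA_self (L : List String) (cs : String) (i : Nat)
    (hcs : cs ≠ "") (hmem : cs ∈ L) (hidx : PySem.List.index? L cs = some i) :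
    pvFmtA L (some cs) cs = pvLineB "cyan" "▸" cs := by
  simp only [pvFmtA, pvLineB, if_pos hmem, hidx, Option.getD_some]
  rw [if_pos hcs]
  simp

-- A's loop body on a stage after the current one (s ≠ cs): a todo line
lemma pvFmtA_todo (L : List String) (cs : String) (i : Nat)
    (hcs : cs ≠ "") (hmem : cs ∈ L) (hidx : PySem.List.index? L cs = some i)
    (s : String) (j : Nat) (hjs : PySem.List.index? L s = some j) (hge : i ≤ j) (hs : s ≠ cs) :
    pvFmtA L (some cs) s = pvLineB "comment" "□" s := by
  have hd : decide (((j : Nat) : Int) < ((i : Nat) : Int)) = false := decide_eq_false (by omega)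
  simp only [pvFmtA, pvLineB, if_pos hmem, hidx, hjs, Option.getD_some]
  rw [if_pos hcs]
  simp only [hd, Option.some.injEq, hs, if_false]
  rfl

-- the core equivalence, for any nodup list of non-empty stage names
lemma pvLoop_eq (L : List String) (hnd : L.Nodup) (hne : "" ∉ L) (c : Option String) :
    pvLoopA L c = pvRenderB L c := by
  unfold pvLoopA pvRenderB
  rw [PySem.List.foldl_append_singleton_eq_map, List.singleton_append]
  refine congrArg (PySem.Str.join "\n") (congrArg _ ?_)
  cases c with
  | none =>
    exact List.map_congr_left (fun s _ => pvFmtA_none L s)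
  | some cs =>
    cases hidx : PySem.List.index? L cs with
    | none =>
      have hmem : cs ∉ L := (PySem.List.index?_eq_none_iff _ _).mp hidx
      simp only [Option.bind_some, hidx]
      exact List.map_congr_left
        (fun s hs => pvFmtA_notmem L cs s hmem (fun e => hmem (e ▸ hs)))
    | some i =>
      obtain ⟨hk, hEq, _⟩ := PySem.List.getElem_of_index?_eq_some hidx
      have hmem : cs ∈ L := hEq ▸ List.getElem_mem hk
      have hcs : cs ≠ "" := fun e => hne (e ▸ hmem)
      simp only [Option.bind_some, hidx, Option.getD_some]
      have hLL : L = L.take i ++ cs :: L.drop (i + 1) := by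
        rw [← hEq, ← List.drop_eq_getElem_cons hk, List.take_append_drop]
      have hmapsplit := congrArg (List.map (pvFmtA L (some cs))) hLL
      rw [List.map_append, List.map_cons] at hmapsplit
      rw [hmapsplit, pvFmtA_self L cs i hcs hmem hidx]
      refine congrArg₂ _ ?_ (congrArg _ ?_)
      · refine List.map_congr_left (fun s hs => ?_)
        rw [List.mem_take_iff_getElem] at hs
        obtain ⟨j, hj, rfl⟩ := hs
        have hjlen : j < L.length := by omega
        have hji : j < i := by omega
        exact pvFmtA_done L cs i hcs hmem hidx _ j
          (pv_index?_getElem L hnd j hjlen) hji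
      · refine List.map_congr_left (fun s hs => ?_)
        rw [List.mem_drop_iff_getElem] at hs
        obtain ⟨j, hj, rfl⟩ := hs
        have hjlen : i + 1 + j < L.length := by omega
        refine pvFmtA_todo L cs i hcs hmem hidx _ (i + 1 + j)
          (pv_index?_getElem L hnd _ hjlen) (by omega) ?_
        intro e
        have : i + 1 + j = i := (hnd.getElem_inj_iff).mp (e.trans hEq.symm)
        omega

-- the fixed stage list is nodup and contains no empty string
lemma pvStages_nodup : pvStagesA.Nodup := by decide
lemma pvStages_ne_empty : "" ∉ pvStagesA := by decide
lemma pvStagesB_eq : pvStagesB = pvStagesA := rfl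

-- ===== VERDICT (by name: the statement is the Claim_ definition above) =====
theorem build_phase_progress_static_py_spec : Claim_equal_build_phase_progress_static_py := by
  intro state _ _
  unfold Spec_build_phase_progress_static_py build_phase_progress_static_py build_phase_progress_static_py_alt
  rw [pvCur_eq, pvStagesB_eq]
  exact pvLoop_eq pvStagesA pvStages_nodup pvStages_ne_empty (pvCurB state)
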